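-- pv_equiv track=rewrite | github.com/karleg/MEDSI | heuristic_async.py | are_ss_discrepant
-- ===== SOURCE A (Python) =====
-- def are_ss_discrepant(steady_states,edges):  #reg_nums may be an empty list, meaning the target has no regulators
--     finished=True
--     tmp_logic=dict()
--     for s in steady_states:
--          for target_num in edges.keys():
--              reg_nums=edges[target_num]
--              k=(target_num,tuple(s[i] for i in reg_nums))
--              if k in tmp_logic.keys():
--                  if tmp_logic[k]!=s[target_num]:
--                      finished=False
--                      break
--              else:
--                  tmp_logic[k]=s[target_num]
--          if not finished:
--             break
--
--     return not finished
-- ===== SOURCE B (Python) =====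
-- def are_ss_discrepant(steady_states, edges):
--     # Group-then-reduce: collect, per (target, regulator-values) key, the SET of
--     # observed target values; discrepant iff some key saw more than one value.
--     groups = {}
--     for s in steady_states:
--         for target_num, reg_nums in edges.items():
--             k = (target_num, tuple(s[i] for i in reg_nums))
--             groups.setdefault(k, set()).add(s[target_num])
--     return any(len(vals) > 1 for vals in groups.values())
-- ===== Notes on version B (the rewrite author's own statement) =====
-- stated objective: simpler
-- what changed: Replaces A's single-value-per-key dict with flag-and-double-break early exit by a full group-then-reduce: one pass accumulates the set of observed target values per (target, regulator-values) key, a second pass asks whether any set has more than one element; Pre_ excludes inputs where a steady state lacks a looked-up node key (KeyError in A; B raises there too, or A only escapes the KeyError by breaking early) and association lists whose edge keys repeat, which represent no Python dict.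
-- outside the precondition, e.g. on are_ss_discrepant([{0: 0, 1: 0}, {0: 1}], {0: [], 1: []}): A returns True, B raises KeyError
import Mathlib
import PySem

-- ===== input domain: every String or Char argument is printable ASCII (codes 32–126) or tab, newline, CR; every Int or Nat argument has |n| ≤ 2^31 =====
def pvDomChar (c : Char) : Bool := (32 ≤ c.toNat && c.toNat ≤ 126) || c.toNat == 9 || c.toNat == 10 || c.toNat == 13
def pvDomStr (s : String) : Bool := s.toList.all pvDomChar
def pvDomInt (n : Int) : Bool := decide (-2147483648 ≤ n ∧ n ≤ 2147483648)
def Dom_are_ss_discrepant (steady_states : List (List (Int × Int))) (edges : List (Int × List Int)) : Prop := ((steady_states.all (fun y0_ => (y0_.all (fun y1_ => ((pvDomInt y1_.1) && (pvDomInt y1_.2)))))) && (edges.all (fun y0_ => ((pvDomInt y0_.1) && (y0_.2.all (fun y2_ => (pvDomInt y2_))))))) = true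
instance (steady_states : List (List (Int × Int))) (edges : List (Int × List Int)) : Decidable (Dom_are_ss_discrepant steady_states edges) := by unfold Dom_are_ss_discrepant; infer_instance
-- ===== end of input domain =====

-- B replaces A's single-value-per-key dict with flag-and-double-break early exit by a
-- group-then-reduce pass (set of observed values per key, then 'any size > 1'): simpler control flow.

-- ===== PORT A =====
-- Literal port of A. Dict lookups that would raise KeyError in Python use getD with a
-- dummy default (0 / []); Pre_are_ss_discrepant excludes exactly such inputs.
def pvAInner (s : List (Int × Int)) (edges : List (Int × List Int)) :
    List Int → PySem.Dict (Int × List Int) Int → PySem.Dict (Int × List Int) Int × Bool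
  | [], tmp => (tmp, true)
  | t :: rest, tmp =>
      let reg_nums := (PySem.Dict.mk edges).getD t []
      let k : Int × List Int := (t, reg_nums.map (fun i => (PySem.Dict.mk s).getD i 0))
      match tmp.get? k with
      | some w => if w ≠ (PySem.Dict.mk s).getD t 0 then (tmp, false)
                  else pvAInner s edges rest tmp
      | none => pvAInner s edges rest (tmp.insert k ((PySem.Dict.mk s).getD t 0))

def pvAOuter (edges : List (Int × List Int)) :
    List (List (Int × Int)) → PySem.Dict (Int × List Int) Int → Bool
  | [], _ => true
  | s :: rest, tmp =>
      match pvAInner s edges ((PySem.Dict.mk edges).keys) tmp with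
      | (tmp', true) => pvAOuter edges rest tmp'
      | (_, false) => false

def are_ss_discrepant (steady_states : List (List (Int × Int))) (edges : List (Int × List Int)) : Bool :=
  !(pvAOuter edges steady_states PySem.Dict.empty)

-- ===== PORT B =====
-- k = (target_num, tuple(s[i] for i in reg_nums))
def pvKey (s : List (Int × Int)) (e : Int × List Int) : Int × List Int :=
  (e.1, e.2.map (fun i => (PySem.Dict.mk s).getD i 0))

-- groups.setdefault(k, set()).add(s[target_num])  =  groups[k] = groups.get(k, set()) ∪ {s[target_num]}
def pvBStep (s : List (Int × Int)) (g : PySem.Dict (Int × List Int) (PySem.Set Int))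
    (e : Int × List Int) : PySem.Dict (Int × List Int) (PySem.Set Int) :=
  g.modify (pvKey s e) PySem.Set.empty
    (fun vals => PySem.Set.add vals ((PySem.Dict.mk s).getD e.1 0))

def are_ss_discrepant_alt (steady_states : List (List (Int × Int))) (edges : List (Int × List Int)) : Bool :=
  let groups := steady_states.foldl
    (fun g s => ((PySem.Dict.mk edges).items).foldl (pvBStep s) g) PySem.Dict.empty
  groups.values.any (fun vals => decide (1 < vals.length))

-- ===== PRECONDITION & SPEC =====
-- Pre_ excludes (i) association lists whose edge keys repeat — they represent no Python dict —
-- and (ii) inputs where some steady state lacks a node key the loops look up: there A raises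
-- KeyError (on a few such inputs A instead returns True by breaking before the missing lookup —
-- see the cite — but B's Python raises KeyError on all of them).
def Pre_are_ss_discrepant (steady_states : List (List (Int × Int))) (edges : List (Int × List Int)) : Prop :=
  (edges.map Prod.fst).Nodup ∧
  ∀ s ∈ steady_states, ∀ e ∈ edges, e.1 ∈ s.map Prod.fst ∧ ∀ i ∈ e.2, i ∈ s.map Prod.fst
instance (steady_states : List (List (Int × Int))) (edges : List (Int × List Int)) : Decidable (Pre_are_ss_discrepant steady_states edges) := by unfold Pre_are_ss_discrepant; infer_instance

def pvWitness_are_ss_discrepant : (List (List (Int × Int))) × (List (Int × List Int)) :=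
  ([[(0, 1), (1, 0)], [(0, 1), (1, 1)]], [(0, [1]), (1, [])])

def Spec_are_ss_discrepant (steady_states : List (List (Int × Int))) (edges : List (Int × List Int)) (out : Bool) : Prop := out = are_ss_discrepant_alt steady_states edges
instance (steady_states : List (List (Int × Int))) (edges : List (Int × List Int)) (out : Bool) : Decidable (Spec_are_ss_discrepant steady_states edges out) := by unfold Spec_are_ss_discrepant; infer_instance

-- ===== CLAIM (what is proved, stated in full; the proofs are below) =====
def Claim_equal_are_ss_discrepant : Prop := ∀ (steady_states : List (List (Int × Int))) (edges : List (Int × List Int)), Dom_are_ss_discrepant steady_states edges → Pre_are_ss_discrepant steady_states edges → Spec_are_ss_discrepant steady_states edges (are_ss_discrepant steady_states edges)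

-- ===== LEMMAS AND PROOFS =====

-- the stream of (key, value) pairs both programs process, in processing order
def pvVal (s : List (Int × Int)) (t : Int) : Int := (PySem.Dict.mk s).getD t 0

def pvPairs (steady_states : List (List (Int × Int))) (edges : List (Int × List Int)) :
    List ((Int × List Int) × Int) :=
  steady_states.flatMap (fun s => edges.map (fun e => (pvKey s e, pvVal s e.1)))

-- A's two nested loops, flattened over the pair stream
def pvRun (tmp : PySem.Dict (Int × List Int) Int) :
    List ((Int × List Int) × Int) → PySem.Dict (Int × List Int) Int × Bool
  | [] => (tmp, true)
  | p :: rest =>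
      match tmp.get? p.1 with
      | some w => if w ≠ p.2 then (tmp, false) else pvRun tmp rest
      | none => pvRun (tmp.insert p.1 p.2) rest

-- B's accumulation step over the pair stream
def pvGStep (g : PySem.Dict (Int × List Int) (PySem.Set Int)) (p : (Int × List Int) × Int) :
    PySem.Dict (Int × List Int) (PySem.Set Int) :=
  g.modify p.1 PySem.Set.empty (fun vals => PySem.Set.add vals p.2)

lemma pvRun_append (L1 L2 : List ((Int × List Int) × Int)) (tmp : PySem.Dict (Int × List Int) Int) :
    pvRun tmp (L1 ++ L2) =
      match pvRun tmp L1 with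
      | (d, true) => pvRun d L2
      | (d, false) => (d, false) := by
  induction L1 generalizing tmp with
  | nil => simp [pvRun]
  | cons p rest ih =>
      simp only [List.cons_append, pvRun]
      cases h : tmp.get? p.1 with
      | some w =>
          by_cases hw : w ≠ p.2
          · simp [hw]
          · simp [hw, ih]
      | none => simp [ih]

lemma pvAInner_eq_pvRun (s : List (Int × Int)) (edges : List (Int × List Int))
    (es' : List (Int × List Int)) (tmp : PySem.Dict (Int × List Int) Int)
    (h : ∀ e ∈ es', (PySem.Dict.mk edges).getD e.1 [] = e.2) :
    pvAInner s edges (es'.map Prod.fst) tmp =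
      pvRun tmp (es'.map (fun e => (pvKey s e, pvVal s e.1))) := by
  induction es' generalizing tmp with
  | nil => simp [pvAInner, pvRun]
  | cons e rest ih =>
      have he : (PySem.Dict.mk edges).getD e.1 [] = e.2 := h e (List.mem_cons_self ..)
      have hrest := fun e' he' => h e' (List.mem_cons_of_mem e he')
      simp only [pvKey, pvVal] at ih ⊢
      simp only [List.map_cons, pvAInner, pvRun, he]
      cases hg : tmp.get? (e.1, e.2.map (fun i => (PySem.Dict.mk s).getD i 0)) with
      | some w =>
          by_cases hw : w ≠ (PySem.Dict.mk s).getD e.1 0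
          · simp [hw]
          · simp only [if_neg hw]
            exact ih tmp hrest
      | none => exact ih _ hrest

lemma pvReg_eq (edges : List (Int × List Int)) (hn : (edges.map Prod.fst).Nodup) :
    ∀ e ∈ edges, (PySem.Dict.mk edges).getD e.1 [] = e.2 := by
  intro e he
  exact PySem.Dict.getD_of_mem_items (PySem.Dict.mk edges)
    (show (e.1, e.2) ∈ (PySem.Dict.mk edges).items from he) hn []

lemma pvAOuter_eq_pvRun (edges : List (Int × List Int)) (ss : List (List (Int × Int)))
    (tmp : PySem.Dict (Int × List Int) Int) (hn : (edges.map Prod.fst).Nodup) :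
    pvAOuter edges ss tmp = (pvRun tmp (pvPairs ss edges)).2 := by
  induction ss generalizing tmp with
  | nil => simp [pvAOuter, pvPairs, pvRun]
  | cons s rest ih =>
      have hkeys : (PySem.Dict.mk edges).keys = edges.map Prod.fst := rfl
      simp only [pvAOuter, hkeys,
        pvAInner_eq_pvRun s edges edges tmp (pvReg_eq edges hn)]
      have : pvPairs (s :: rest) edges =
          (edges.map (fun e => (pvKey s e, pvVal s e.1))) ++ pvPairs rest edges := by
        simp [pvPairs]
      rw [this, pvRun_append]
      cases hr : pvRun tmp (edges.map (fun e => (pvKey s e, pvVal s e.1))) with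
      | mk d fin =>
          cases fin with
          | true => simp [ih]
          | false => simp

lemma pvRun_false_iff (L : List ((Int × List Int) × Int)) (tmp : PySem.Dict (Int × List Int) Int) :
    (pvRun tmp L).2 = false ↔
      ∃ k v w, (k, v) ∈ L ∧ (tmp.get? k = some w ∨ (k, w) ∈ L) ∧ v ≠ w := by
  induction L generalizing tmp with
  | nil => simp [pvRun]
  | cons p rest ih =>
      cases h : tmp.get? p.1 with
      | some w0 =>
          have hred : pvRun tmp (p :: rest) =
              if w0 ≠ p.2 then (tmp, false) else pvRun tmp rest := by
            simp [pvRun, h]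
          rw [hred]
          by_cases hw : w0 ≠ p.2
          · rw [if_pos hw]
            constructor
            · intro _
              exact ⟨p.1, p.2, w0, List.mem_cons_self .., Or.inl h, fun hv => hw hv.symm⟩
            · intro _; rfl
          · have heq : w0 = p.2 := not_ne_iff.mp hw
            subst heq
            rw [if_neg hw, ih]
            constructor
            · rintro ⟨k, v, w, hv, hw', hne⟩
              exact ⟨k, v, w, List.mem_cons_of_mem _ hv,
                hw'.elim Or.inl (fun hm => Or.inr (List.mem_cons_of_mem _ hm)), hne⟩
            · rintro ⟨k, v, w, hv, hw', hne⟩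
              rcases List.mem_cons.mp hv with hv | hv
              · -- (k, v) is the head pair p, so v = tmp[k]; the other occurrence is in rest
                have hk : k = p.1 := congrArg Prod.fst hv
                have hvv : v = p.2 := congrArg Prod.snd hv
                subst hk; subst hvv
                rcases hw' with hw' | hw'
                · rw [h] at hw'; cases hw'; exact absurd rfl hne
                · rcases List.mem_cons.mp hw' with hw' | hw'
                  · have : w = p.2 := congrArg Prod.snd hw'
                    exact absurd this.symm hne
                  · exact ⟨p.1, w, p.2, hw', Or.inl h, fun hc => hne hc.symm⟩
              · rcases hw' with hw' | hw'
                · exact ⟨k, v, w, hv, Or.inl hw', hne⟩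
                · rcases List.mem_cons.mp hw' with hw' | hw'
                  · have hk : k = p.1 := congrArg Prod.fst hw'
                    have hww : w = p.2 := congrArg Prod.snd hw'
                    subst hk; subst hww
                    exact ⟨p.1, v, p.2, hv, Or.inl h, hne⟩
                  · exact ⟨k, v, w, hv, Or.inr hw', hne⟩
      | none =>
          have hred : pvRun tmp (p :: rest) = pvRun (tmp.insert p.1 p.2) rest := by
            simp [pvRun, h]
          rw [hred, ih]
          constructor
          · rintro ⟨k, v, w, hv, hw', hne⟩
            rcases hw' with hw' | hw'
            · rw [PySem.Dict.get?_insert] at hw'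
              by_cases hk : k = p.1
              · rw [if_pos hk] at hw'
                cases hw'
                subst hk
                exact ⟨p.1, v, p.2, List.mem_cons_of_mem _ hv, Or.inr (List.mem_cons_self ..), hne⟩
              · rw [if_neg hk] at hw'
                exact ⟨k, v, w, List.mem_cons_of_mem _ hv, Or.inl hw', hne⟩
            · exact ⟨k, v, w, List.mem_cons_of_mem _ hv,
                Or.inr (List.mem_cons_of_mem _ hw'), hne⟩
          · rintro ⟨k, v, w, hv, hw', hne⟩
            rcases List.mem_cons.mp hv with hv | hv
            · have hk : k = p.1 := congrArg Prod.fst hv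
              have hvv : v = p.2 := congrArg Prod.snd hv
              subst hk; subst hvv
              rcases hw' with hw' | hw'
              · rw [h] at hw'; cases hw'
              · rcases List.mem_cons.mp hw' with hw' | hw'
                · have : w = p.2 := congrArg Prod.snd hw'
                  exact absurd this.symm hne
                · exact ⟨p.1, w, p.2, hw', Or.inl (PySem.Dict.get?_insert_self ..), fun hc => hne hc.symm⟩
            · rcases hw' with hw' | hw'
              · by_cases hk : k = p.1
                · subst hk; rw [h] at hw'; cases hw'
                · exact ⟨k, v, w, hv, Or.inl (by rw [PySem.Dict.get?_insert, if_neg hk]; exact hw'), hne⟩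
              · rcases List.mem_cons.mp hw' with hw' | hw'
                · have hk : k = p.1 := congrArg Prod.fst hw'
                  have hww : w = p.2 := congrArg Prod.snd hw'
                  subst hk; subst hww
                  exact ⟨p.1, v, p.2, hv, Or.inl (PySem.Dict.get?_insert_self ..), hne⟩
                · exact ⟨k, v, w, hv, Or.inr hw', hne⟩

lemma pvA_true_iff (ss : List (List (Int × Int))) (es : List (Int × List Int))
    (hn : (es.map Prod.fst).Nodup) :
    are_ss_discrepant ss es = true ↔
      ∃ k v w, (k, v) ∈ pvPairs ss es ∧ (k, w) ∈ pvPairs ss es ∧ v ≠ w := by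
  unfold are_ss_discrepant
  rw [Bool.not_eq_true', pvAOuter_eq_pvRun es ss _ hn, pvRun_false_iff]
  simp [PySem.Dict.get?_empty]

-- B-side: the groups dict over the flattened pair stream
lemma pvAlt_eq_fold (ss : List (List (Int × Int))) (es : List (Int × List Int)) :
    are_ss_discrepant_alt ss es =
      ((pvPairs ss es).foldl pvGStep PySem.Dict.empty).values.any
        (fun vals => decide (1 < vals.length)) := by
  have hstep : (fun (g : PySem.Dict (Int × List Int) (PySem.Set Int)) (s : List (Int × Int)) =>
        ((PySem.Dict.mk es).items).foldl (pvBStep s) g)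
      = (fun acc s => (es.map (fun e => (pvKey s e, pvVal s e.1))).foldl pvGStep acc) := by
    funext g s
    rw [List.foldl_map]
    rfl
  show ((ss.foldl (fun g s => ((PySem.Dict.mk es).items).foldl (pvBStep s) g)
      PySem.Dict.empty).values.any (fun vals => decide (1 < vals.length))) = _
  rw [hstep]
  unfold pvPairs
  rw [List.foldl_flatMap]

lemma pvMem_getD_fold (L : List ((Int × List Int) × Int))
    (g : PySem.Dict (Int × List Int) (PySem.Set Int)) (k : Int × List Int) (v : Int) :
    v ∈ (L.foldl pvGStep g).getD k PySem.Set.empty ↔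
      v ∈ g.getD k PySem.Set.empty ∨ (k, v) ∈ L := by
  induction L generalizing g with
  | nil => simp
  | cons p rest ih =>
      simp only [List.foldl_cons, ih, pvGStep, PySem.Dict.getD_modify, List.mem_cons]
      by_cases hk : k = p.1
      · subst hk
        rw [if_pos rfl]
        simp only [PySem.Set.mem_add]
        constructor
        · rintro ((h | h) | h)
          · exact Or.inl h
          · exact Or.inr (Or.inl (Prod.ext_iff.mpr ⟨rfl, h⟩))
          · exact Or.inr (Or.inr h)
        · rintro (h | h | h)
          · exact Or.inl (Or.inl h)
          · exact Or.inl (Or.inr (congrArg Prod.snd h))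
          · exact Or.inr h
      · rw [if_neg hk]
        constructor
        · rintro (h | h)
          · exact Or.inl h
          · exact Or.inr (Or.inr h)
        · rintro (h | h | h)
          · exact Or.inl h
          · exact absurd (congrArg Prod.fst h) hk
          · exact Or.inr h

lemma pvNodup_getD_fold (L : List ((Int × List Int) × Int))
    (g : PySem.Dict (Int × List Int) (PySem.Set Int))
    (hg : ∀ k, (g.getD k PySem.Set.empty).Nodup) (k : Int × List Int) :
    ((L.foldl pvGStep g).getD k PySem.Set.empty).Nodup := by
  induction L generalizing g with
  | nil => exact hg k
  | cons p rest ih =>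
      refine ih _ (fun k' => ?_)
      rw [pvGStep, PySem.Dict.getD_modify]
      by_cases hk : k' = p.1
      · rw [if_pos hk]; exact PySem.Set.nodup_add _ _ (hg p.1)
      · rw [if_neg hk]; exact hg k'

lemma pvTwo_mem_one_lt_length {l : List Int} {a b : Int}
    (ha : a ∈ l) (hb : b ∈ l) (hne : a ≠ b) : 1 < l.length := by
  match l with
  | [] => simp at ha
  | [x] =>
      simp only [List.mem_singleton] at ha hb
      exact absurd (ha.trans hb.symm) hne
  | x :: y :: rest => simp

lemma pvNodup_two_mem {l : List Int} (hnd : l.Nodup) (hlen : 1 < l.length) :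
    ∃ a b, a ∈ l ∧ b ∈ l ∧ a ≠ b := by
  match l with
  | [] => simp at hlen
  | [x] => simp at hlen
  | x :: y :: rest =>
      refine ⟨x, y, List.mem_cons_self .., List.mem_cons_of_mem _ (List.mem_cons_self ..), ?_⟩
      intro h
      exact (List.nodup_cons.mp hnd).1 (h ▸ List.mem_cons_self ..)

lemma pvB_true_iff (ss : List (List (Int × Int))) (es : List (Int × List Int)) :
    are_ss_discrepant_alt ss es = true ↔
      ∃ k v w, (k, v) ∈ pvPairs ss es ∧ (k, w) ∈ pvPairs ss es ∧ v ≠ w := by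
  rw [pvAlt_eq_fold]
  set L := pvPairs ss es with hL
  set G := L.foldl pvGStep PySem.Dict.empty with hG
  have hnd : G.keys.Nodup := by
    rw [hG]
    exact PySem.Dict.nodup_keys_foldl_modify_key L Prod.fst PySem.Set.empty
      (fun _ p => fun vals => PySem.Set.add vals p.2) PySem.Dict.empty
      PySem.Dict.nodup_keys_empty
  rw [PySem.Dict.values_eq_map_keys G hnd PySem.Set.empty, List.any_map, List.any_eq_true]
  have hkeys : G.keys = PySem.Set.update (PySem.Dict.empty : PySem.Dict (Int × List Int) (PySem.Set Int)).keys (L.map Prod.fst) := by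
    rw [hG]
    exact PySem.Dict.keys_foldl_modify_key L Prod.fst PySem.Set.empty
      (fun _ p => fun vals => PySem.Set.add vals p.2) PySem.Dict.empty
  have hmem : ∀ k v, v ∈ G.getD k PySem.Set.empty ↔ (k, v) ∈ L := by
    intro k v
    rw [hG, pvMem_getD_fold]
    simp [PySem.Dict.getD_empty, PySem.Set.empty]
  constructor
  · rintro ⟨k, hk, hlen⟩
    simp only [Function.comp, decide_eq_true_eq] at hlen
    have hnodup : (G.getD k PySem.Set.empty).Nodup :=
      hG ▸ pvNodup_getD_fold L PySem.Dict.empty (fun k' => by simp [PySem.Set.empty]) k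
    obtain ⟨a, b, ha, hb, hne⟩ := pvNodup_two_mem hnodup hlen
    exact ⟨k, a, b, (hmem k a).mp ha, (hmem k b).mp hb, hne⟩
  · rintro ⟨k, v, w, hv, hw, hne⟩
    refine ⟨k, ?_, ?_⟩
    · rw [hkeys, PySem.Set.mem_update]
      exact Or.inr (List.mem_map.mpr ⟨(k, v), hv, rfl⟩)
    · simp only [Function.comp, decide_eq_true_eq]
      exact pvTwo_mem_one_lt_length ((hmem k v).mpr hv) ((hmem k w).mpr hw) hne

-- ===== VERDICT (by name: the statement is the Claim_ definition above) =====
theorem are_ss_discrepant_spec : Claim_equal_are_ss_discrepant := by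
  intro ss es _dom hpre
  unfold Spec_are_ss_discrepant
  rw [Bool.eq_iff_iff, pvA_true_iff ss es hpre.1, pvB_true_iff]
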